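-- pv_equiv track=rewrite | github.com/benbendaisy/CommunicationCodes | python_module/examples/2179_Count_Good_Triplets_in_an_Array.py | goodTriplets1
-- ===== SOURCE A (Python) =====
-- from typing import List
--
-- def goodTriplets1(nums1: List[int], nums2: List[int]) -> int:
--     """
--     Time Limit Exceeded
--     """
--     if not nums1 or not nums2 or len(nums1) != len(nums2):
--         return 0
--     pos_dict = {v:i for i, v in enumerate(nums2)}
--     cnt, n = 0, len(nums1)
--     for i in range(n - 2):
--         for j in range(i + 1, n - 1):
--             for k in range(j + 1, n):
--                 if pos_dict[nums1[i]] < pos_dict[nums1[j]] < pos_dict[nums1[k]]: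
--                     cnt += 1
--     return cnt
-- ===== SOURCE B (Python) =====
-- from typing import List
--
-- def goodTriplets1(nums1: List[int], nums2: List[int]) -> int:
--     if not nums1 or not nums2 or len(nums1) != len(nums2):
--         return 0
--     pos = {v: i for i, v in enumerate(nums2)}
--     p = [pos[v] for v in nums1]
--     n = len(p)
--     cnt = 0
--     for j in range(n):
--         pj = p[j]
--         left = sum(1 for i in range(j) if p[i] < pj)
--         right = sum(1 for k in range(j + 1, n) if p[k] > pj)
--         cnt += left * right
--     return cnt
-- ===== Notes on version B (the rewrite author's own statement) =====
-- stated objective: faster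
-- what changed: Replaces A's triple nested loop over all index triples by a single pass over the middle index j, multiplying the count of left elements with smaller nums2-position by the count of right elements with larger position.
-- outside the precondition, e.g. on goodTriplets1([1, 2, 0], [2, 1, 3]): A returns 0, B raises KeyError; on goodTriplets1([5], [1]): A returns 0, B raises KeyError
import Mathlib
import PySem

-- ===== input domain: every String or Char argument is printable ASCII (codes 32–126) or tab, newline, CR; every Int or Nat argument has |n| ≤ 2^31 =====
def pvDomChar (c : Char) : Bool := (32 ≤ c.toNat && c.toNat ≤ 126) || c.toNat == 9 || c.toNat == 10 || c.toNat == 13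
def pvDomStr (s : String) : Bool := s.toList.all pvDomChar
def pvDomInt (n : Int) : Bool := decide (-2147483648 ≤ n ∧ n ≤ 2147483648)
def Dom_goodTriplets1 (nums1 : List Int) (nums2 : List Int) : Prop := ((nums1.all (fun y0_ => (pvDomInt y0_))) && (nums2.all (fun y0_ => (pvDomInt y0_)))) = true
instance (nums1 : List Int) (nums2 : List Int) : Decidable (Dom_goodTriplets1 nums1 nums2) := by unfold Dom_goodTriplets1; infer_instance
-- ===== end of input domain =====

-- B replaces A's cubic triple loop by a per-middle-element count (for each j:
-- #smaller-position elements on the left * #larger-position elements on the right), O(n^2) vs O(n^3).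

-- ===== PORT A =====
-- pos_dict[x] is ported as Dict.getD _ _ 0: exact under Pre_ (every looked-up key is present there).
def goodTriplets1 (nums1 : List Int) (nums2 : List Int) : Int :=
  if nums1 = [] ∨ nums2 = [] ∨ nums1.length ≠ nums2.length then 0
  else
    let pos : PySem.Dict Int Int :=
      (PySem.List.enumerate nums2 0).foldl (fun d p => d.insert p.2 p.1) PySem.Dict.empty
    let n : Int := nums1.length
    (PySem.List.pyRange 0 (n - 2) 1).foldl (fun cnt i =>
      (PySem.List.pyRange (i + 1) (n - 1) 1).foldl (fun cnt j =>
        (PySem.List.pyRange (j + 1) n 1).foldl (fun cnt k =>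
          if pos.getD (PySem.List.pyGetD nums1 i 0) 0 < pos.getD (PySem.List.pyGetD nums1 j 0) 0 ∧
             pos.getD (PySem.List.pyGetD nums1 j 0) 0 < pos.getD (PySem.List.pyGetD nums1 k 0) 0
          then cnt + 1 else cnt) cnt) cnt) 0

-- ===== PORT B =====
def goodTriplets1_alt (nums1 : List Int) (nums2 : List Int) : Int :=
  if nums1 = [] ∨ nums2 = [] ∨ nums1.length ≠ nums2.length then 0
  else
    let pos : PySem.Dict Int Int :=
      (PySem.List.enumerate nums2 0).foldl (fun d p => d.insert p.2 p.1) PySem.Dict.empty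
    let p : List Int := nums1.map (fun v => pos.getD v 0)
    let n : Int := p.length
    (PySem.List.pyRange 0 n 1).foldl (fun cnt j =>
      let pj := PySem.List.pyGetD p j 0
      let left := ((PySem.List.pyRange 0 j 1).map
        (fun i => if PySem.List.pyGetD p i 0 < pj then (1 : Int) else 0)).sum
      let right := ((PySem.List.pyRange (j + 1) n 1).map
        (fun k => if pj < PySem.List.pyGetD p k 0 then (1 : Int) else 0)).sum
      cnt + left * right) 0

-- ===== PRECONDITION & SPEC =====
-- Pre_ excludes inputs with an element of nums1 missing from nums2 (KeyError territory): B's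
-- comprehension [pos[v] for v in nums1] raises on all of them, A raises on those it actually looks
-- up, and on the remainder (never looked up because the loops do not run or the chained comparison
-- short-circuits) A's returned 0 is an accident of evaluation order — excluded with the rest.
def Pre_goodTriplets1 (nums1 : List Int) (nums2 : List Int) : Prop :=
  nums1.length ≠ nums2.length ∨ nums1 = [] ∨ ∀ x ∈ nums1, x ∈ nums2
instance (nums1 : List Int) (nums2 : List Int) : Decidable (Pre_goodTriplets1 nums1 nums2) := by
  unfold Pre_goodTriplets1; infer_instance

def pvWitness_goodTriplets1 : List Int × List Int := ([2, 0, 1, 3], [0, 1, 2, 3])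

def Spec_goodTriplets1 (nums1 : List Int) (nums2 : List Int) (out : Int) : Prop := out = goodTriplets1_alt nums1 nums2
instance (nums1 : List Int) (nums2 : List Int) (out : Int) : Decidable (Spec_goodTriplets1 nums1 nums2 out) := by unfold Spec_goodTriplets1; infer_instance

-- ===== CLAIM (what is proved, stated in full; the proofs are below) =====
def Claim_equal_goodTriplets1 : Prop := ∀ (nums1 : List Int) (nums2 : List Int), Dom_goodTriplets1 nums1 nums2 → Pre_goodTriplets1 nums1 nums2 → Spec_goodTriplets1 nums1 nums2 (goodTriplets1 nums1 nums2)

-- ===== LEMMAS AND PROOFS =====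

theorem pv_toFinset (a b : Int) : (PySem.List.pyRange a b 1).toFinset = Finset.Ico a b := by
  ext x
  simp [PySem.List.mem_pyRange_one, Finset.mem_Ico]

theorem pv_sumIco (a b : Int) (h : Int → Int) :
    ((PySem.List.pyRange a b 1).map h).sum = ∑ x ∈ Finset.Ico a b, h x := by
  rw [← List.sum_toFinset h (PySem.List.nodup_pyRange_one a b), pv_toFinset]

theorem pv_foldl_ite_sum (l : List Int) (p : Int → Prop) [DecidablePred p] (c : Int) :
    l.foldl (fun c k => if p k then c + 1 else c) c
      = c + (l.map (fun k => if p k then (1 : Int) else 0)).sum := by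
  rw [PySem.List.foldl_ite_add_one, ← PySem.List.sum_map_ite_one_zero (fun k => decide (p k))]
  simp

-- exchanging the order of a sum over pairs i < j (with vanishing tail terms)
theorem pv_swap (n : Int) (G : Int → Int → Int) (hz : ∀ i j, n - 1 ≤ j → G i j = 0) :
    ∑ i ∈ Finset.Ico (0:Int) (n-2), ∑ j ∈ Finset.Ico (i+1) (n-1), G i j
      = ∑ j ∈ Finset.Ico (0:Int) n, ∑ i ∈ Finset.Ico (0:Int) j, G i j := by
  have e1 : ∀ i : Int, ∑ j ∈ Finset.Ico (i+1) (n-1), G i j = ∑ j ∈ Finset.Ico (i+1) n, G i j := by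
    intro i
    apply Finset.sum_subset
    · intro x hx; simp only [Finset.mem_Ico] at *; omega
    · intro x hx hnx; simp only [Finset.mem_Ico] at *
      exact hz i x (by omega)
  have e2 : ∑ i ∈ Finset.Ico (0:Int) (n-2), ∑ j ∈ Finset.Ico (i+1) n, G i j
      = ∑ i ∈ Finset.Ico (0:Int) n, ∑ j ∈ Finset.Ico (i+1) n, G i j := by
    apply Finset.sum_subset
    · intro x hx; simp only [Finset.mem_Ico] at *; omega
    · intro x hx hnx
      apply Finset.sum_eq_zero
      intro j hj; simp only [Finset.mem_Ico] at *
      exact hz x j (by omega)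
  have e3 : ∀ i ∈ Finset.Ico (0:Int) n, ∑ j ∈ Finset.Ico (i+1) n, G i j
      = ∑ j ∈ Finset.Ico (0:Int) n, if i + 1 ≤ j then G i j else 0 := by
    intro i hi; simp only [Finset.mem_Ico] at hi
    rw [← Finset.sum_filter]
    congr 1
    ext x; simp only [Finset.mem_filter, Finset.mem_Ico]; omega
  have e4 : ∀ j ∈ Finset.Ico (0:Int) n, (∑ i ∈ Finset.Ico (0:Int) n, if i + 1 ≤ j then G i j else 0)
      = ∑ i ∈ Finset.Ico (0:Int) j, G i j := by
    intro j hj; simp only [Finset.mem_Ico] at hj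
    rw [← Finset.sum_filter]
    congr 1
    ext x; simp only [Finset.mem_filter, Finset.mem_Ico]; omega
  calc ∑ i ∈ Finset.Ico (0:Int) (n-2), ∑ j ∈ Finset.Ico (i+1) (n-1), G i j
      = ∑ i ∈ Finset.Ico (0:Int) (n-2), ∑ j ∈ Finset.Ico (i+1) n, G i j := by
        exact Finset.sum_congr rfl (fun i _ => e1 i)
    _ = ∑ i ∈ Finset.Ico (0:Int) n, ∑ j ∈ Finset.Ico (i+1) n, G i j := e2
    _ = ∑ i ∈ Finset.Ico (0:Int) n, ∑ j ∈ Finset.Ico (0:Int) n, if i + 1 ≤ j then G i j else 0 :=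
        Finset.sum_congr rfl e3
    _ = ∑ j ∈ Finset.Ico (0:Int) n, ∑ i ∈ Finset.Ico (0:Int) n, if i + 1 ≤ j then G i j else 0 :=
        Finset.sum_comm
    _ = ∑ j ∈ Finset.Ico (0:Int) n, ∑ i ∈ Finset.Ico (0:Int) j, G i j :=
        Finset.sum_congr rfl e4

theorem pv_ite_mul (P Q : Prop) [Decidable P] [Decidable Q] :
    (if P then (1:Int) else 0) * (if Q then (1:Int) else 0) = if P ∧ Q then 1 else 0 := by
  split_ifs <;> simp_all

-- the counting identity behind the rewrite, for an arbitrary position function g: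
-- A's triple loop equals B's per-middle-element product sum
theorem pv_key (g : Int → Int) (n : Int) :
    (PySem.List.pyRange 0 (n - 2) 1).foldl (fun cnt i =>
      (PySem.List.pyRange (i + 1) (n - 1) 1).foldl (fun cnt j =>
        (PySem.List.pyRange (j + 1) n 1).foldl (fun cnt k =>
          if g i < g j ∧ g j < g k then cnt + 1 else cnt) cnt) cnt) 0
  = (PySem.List.pyRange 0 n 1).foldl (fun cnt j =>
      cnt + ((PySem.List.pyRange 0 j 1).map (fun i => if g i < g j then (1 : Int) else 0)).sum
          * ((PySem.List.pyRange (j + 1) n 1).map (fun k => if g j < g k then (1 : Int) else 0)).sum) 0 := by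
  have hL : (PySem.List.pyRange 0 (n - 2) 1).foldl (fun cnt i =>
      (PySem.List.pyRange (i + 1) (n - 1) 1).foldl (fun cnt j =>
        (PySem.List.pyRange (j + 1) n 1).foldl (fun cnt k =>
          if g i < g j ∧ g j < g k then cnt + 1 else cnt) cnt) cnt) 0
      = ∑ i ∈ Finset.Ico (0:Int) (n-2), ∑ j ∈ Finset.Ico (i+1) (n-1),
          ∑ k ∈ Finset.Ico (j+1) n, (if g i < g j ∧ g j < g k then (1:Int) else 0) := by
    simp only [pv_foldl_ite_sum, pv_sumIco, PySem.List.foldl_add, zero_add]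
  have hR : (PySem.List.pyRange 0 n 1).foldl (fun cnt j =>
      cnt + ((PySem.List.pyRange 0 j 1).map (fun i => if g i < g j then (1 : Int) else 0)).sum
          * ((PySem.List.pyRange (j + 1) n 1).map (fun k => if g j < g k then (1 : Int) else 0)).sum) 0
      = ∑ j ∈ Finset.Ico (0:Int) n, ∑ i ∈ Finset.Ico (0:Int) j,
          ∑ k ∈ Finset.Ico (j+1) n, (if g i < g j ∧ g j < g k then (1:Int) else 0) := by
    rw [PySem.List.foldl_add, zero_add, pv_sumIco]
    refine Finset.sum_congr rfl (fun j _ => ?_)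
    rw [pv_sumIco, pv_sumIco, Finset.sum_mul_sum]
    exact Finset.sum_congr rfl (fun i _ => Finset.sum_congr rfl (fun k _ => pv_ite_mul _ _))
  rw [hL, hR]
  apply pv_swap
  intro i j hj
  rw [Finset.Ico_eq_empty (by omega), Finset.sum_empty]

theorem pv_pg (xs : List Int) (gg : Int → Int) (x : Int) (h0 : 0 ≤ x) (hx : x < (xs.length : Int)) :
    PySem.List.pyGetD (xs.map gg) x 0 = gg (PySem.List.pyGetD xs x 0) := by
  rw [PySem.List.pyGetD_eq_getElem (xs.map gg) 0 h0 (by simpa using hx),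
      PySem.List.pyGetD_eq_getElem xs 0 h0 hx, List.getElem_map]

theorem pv_ports_eq (nums1 nums2 : List Int) :
    goodTriplets1 nums1 nums2 = goodTriplets1_alt nums1 nums2 := by
  simp only [goodTriplets1, goodTriplets1_alt]
  split_ifs with h
  · rfl
  set pos : PySem.Dict Int Int :=
    (PySem.List.enumerate nums2 0).foldl (fun d p => d.insert p.2 p.1) PySem.Dict.empty with hpos
  set gg : Int → Int := fun v => pos.getD v 0 with hgg
  refine Eq.trans (pv_key (fun t => pos.getD (PySem.List.pyGetD nums1 t 0) 0) (nums1.length : Int)) ?_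
  rw [List.length_map]
  apply PySem.List.foldl_congr_mem
  intro cnt j hj
  rw [PySem.List.mem_pyRange_one] at hj
  have hpgj : PySem.List.pyGetD (nums1.map gg) j 0 = gg (PySem.List.pyGetD nums1 j 0) :=
    pv_pg nums1 gg j hj.1 hj.2
  simp only [hpgj]
  congr 1
  congr 1
  · refine congrArg List.sum (List.map_congr_left ?_)
    intro i hi
    rw [PySem.List.mem_pyRange_one] at hi
    rw [pv_pg nums1 gg i hi.1 (by omega)]
  · refine congrArg List.sum (List.map_congr_left ?_)
    intro k hk
    rw [PySem.List.mem_pyRange_one] at hk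
    rw [pv_pg nums1 gg k (by omega) hk.2]

-- ===== VERDICT (by name: the statement is the Claim_ definition above) =====
theorem goodTriplets1_spec : Claim_equal_goodTriplets1 := by
  intro nums1 nums2 _ _
  unfold Spec_goodTriplets1
  exact pv_ports_eq nums1 nums2
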